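-- pv_equiv track=rewrite | github.com/dovan2026/test_python | pick_up_toy.py | solution
-- ===== SOURCE A (Python) =====
-- def solution(board, moves):
--     # 각 열(Column)에서 0을 제외한 인형만 추출한 뒤, pop()하기 쉽게 역순 정렬
--     cols = [list(filter(None, col))[::-1] for col in zip(*board)]
--     stack = []
--     result = 0
--
--     for m in moves:
--         col = cols[m - 1]
--         if col:
--             doll = col.pop()
--             if stack and stack[-1] == doll:
--                 stack.pop()
--                 result += 2
--             else:
--                 stack.append(doll)
--
--     return result
-- ===== SOURCE B (Python) =====
-- def solution(board, moves):
--     # Column-pointer version: no transpose/filter preprocessing; board is never modified.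
--     n = len(board)
--     width = len(board[0]) if board else 0
--     tops = [0] * width          # tops[c] = first row of column c not yet removed
--     stack = []
--     result = 0
--     for m in moves:
--         c = m - 1
--         r = tops[c]
--         while r < n and board[r][c] == 0:
--             r += 1
--         if r < n:
--             doll = board[r][c]
--             tops[c] = r + 1
--             if stack and stack[-1] == doll:
--                 stack.pop()
--                 result += 2
--             else:
--                 stack.append(doll)
--         else:
--             tops[c] = r
--     return result
-- ===== Notes on version B (the rewrite author's own statement) =====
-- stated objective: simpler
-- what changed: B drops A's transpose/filter/reverse preprocessing and destructive column stacks entirely and instead keeps one row-pointer per column, scanning each column lazily downward on demand; the board is never copied or modified.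
-- outside the precondition, e.g. on solution([[2, 1], [2]], [0, 0]): A returns 2, B returns 0
import Mathlib
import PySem

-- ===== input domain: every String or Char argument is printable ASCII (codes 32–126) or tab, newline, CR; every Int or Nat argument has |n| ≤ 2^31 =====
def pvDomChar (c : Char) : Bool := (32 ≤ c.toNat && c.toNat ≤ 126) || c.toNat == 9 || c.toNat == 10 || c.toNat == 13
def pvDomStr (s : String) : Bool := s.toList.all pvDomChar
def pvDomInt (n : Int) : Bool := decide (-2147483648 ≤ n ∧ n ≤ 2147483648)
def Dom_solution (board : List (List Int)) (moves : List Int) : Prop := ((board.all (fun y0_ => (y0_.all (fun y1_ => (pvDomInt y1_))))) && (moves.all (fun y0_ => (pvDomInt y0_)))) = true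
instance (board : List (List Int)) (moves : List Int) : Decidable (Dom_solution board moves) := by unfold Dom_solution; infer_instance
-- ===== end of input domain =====

-- B replaces A's transpose/filter/reverse preprocessing and destructive column stacks with one lazy
-- row-pointer per column, reading the board in place; objective: simpler.

-- ===== PORT A =====
-- zip(*rows): take the heads of all rows while every row is nonempty (Python's zip stops at the shortest row)
def pyZip (rows : List (List Int)) : List (List Int) :=
  if _h : rows ≠ [] ∧ rows.all (fun r => !r.isEmpty) then
    rows.map (fun r => r.headI) :: pyZip (rows.map List.tail)
  else []
termination_by (rows.headI).length
decreasing_by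
  obtain ⟨hne, hall⟩ := _h
  cases rows with
  | nil => exact absurd rfl hne
  | cons r rest =>
    simp only [List.all_cons, Bool.and_eq_true, Bool.not_eq_true'] at hall
    simp only [List.attach_cons, List.map_cons, List.headI_cons, List.length_tail,
      List.map_map]
    have hr : r ≠ [] := by simpa [List.isEmpty_iff] using hall.1
    have : 0 < r.length := List.length_pos_of_ne_nil hr
    omega

-- one iteration of A's `for m in moves` loop; state = (cols, stack, result)
def stepA (st : List (List Int) × List Int × Int) (m : Int) : List (List Int) × List Int × Int :=
  match PySem.List.pyGet? st.1 (m - 1) with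
  | none => st            -- Python raises IndexError here; excluded by Pre_
  | some col =>
    match col.getLast? with
    | none => st          -- `if col:` is false: skip the move
    | some doll =>        -- doll = col.pop()
      let cols' := PySem.List.pySetD st.1 (m - 1) col.dropLast
      match st.2.1.getLast? with
      | some t =>
        if t = doll then (cols', st.2.1.dropLast, st.2.2 + 2)
        else (cols', st.2.1 ++ [doll], st.2.2)
      | none => (cols', st.2.1 ++ [doll], st.2.2)

def solution (board : List (List Int)) (moves : List Int) : Int :=
  let cols := (pyZip board).map (fun col => (col.filter (fun x => decide (x ≠ 0))).reverse)
  (moves.foldl stepA (cols, ([] : List Int), (0 : Int))).2.2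

-- ===== PORT B =====
-- B's `while r < n and board[r][c] == 0: r += 1` (pyGetD's default 1 is never read under Pre_: r < len(board) and c in range)
def advB (board : List (List Int)) (c : Int) (r : Nat) : Nat :=
  if h : r < board.length then
    if PySem.List.pyGetD board[r] c 1 = 0 then advB board c (r + 1) else r
  else r
termination_by board.length - r

-- one iteration of B's loop; state = (tops, stack, result)
def stepB (board : List (List Int)) (st : List Nat × List Int × Int) (m : Int) : List Nat × List Int × Int :=
  let c := m - 1
  let r := PySem.List.pyGetD st.1 c 0
  let r' := advB board c r
  if h : r' < board.length then
    let doll := PySem.List.pyGetD board[r'] c 0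
    let tops' := PySem.List.pySetD st.1 c (r' + 1)
    match st.2.1.getLast? with
    | some t =>
      if t = doll then (tops', st.2.1.dropLast, st.2.2 + 2)
      else (tops', st.2.1 ++ [doll], st.2.2)
    | none => (tops', st.2.1 ++ [doll], st.2.2)
  else
    (PySem.List.pySetD st.1 c r', st.2.1, st.2.2)

def solution_alt (board : List (List Int)) (moves : List Int) : Int :=
  (moves.foldl (stepB board) (List.replicate board.headI.length 0, ([] : List Int), (0 : Int))).2.2

-- ===== PRECONDITION & SPEC =====
-- Pre_ excludes ragged boards (rows of unequal length), where A's zip truncation silently ignores the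
-- tails of longer rows while B walks whole columns (B may also raise IndexError there), and moves whose
-- index m-1 falls outside Python's wrap range for the column list, where A raises IndexError.
def Pre_solution (board : List (List Int)) (moves : List Int) : Prop :=
  (∀ row ∈ board, row.length = board.headI.length) ∧
  (∀ m ∈ moves, 1 - (board.headI.length : Int) ≤ m ∧ m ≤ (board.headI.length : Int) ∧
    0 < board.headI.length)
instance (board : List (List Int)) (moves : List Int) : Decidable (Pre_solution board moves) := by
  unfold Pre_solution; infer_instance

def pvWitness_solution : List (List Int) × List Int := ([[1, 0], [2, 2]], [1, 2, 2])

def Spec_solution (board : List (List Int)) (moves : List Int) (out : Int) : Prop := out = solution_alt board moves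
instance (board : List (List Int)) (moves : List Int) (out : Int) : Decidable (Spec_solution board moves out) := by unfold Spec_solution; infer_instance

-- ===== CLAIM (what is proved, stated in full; the proofs are below) =====
def Claim_equal_solution : Prop := ∀ (board : List (List Int)) (moves : List Int), Dom_solution board moves → Pre_solution board moves → Spec_solution board moves (solution board moves)

-- ===== LEMMAS AND PROOFS =====

-- column j of the board
def colOf (board : List (List Int)) (j : Nat) : List Int :=
  board.map (fun row => row.getD j 0)

-- the still-uncollected dolls of column j, top-down, once B's pointer is at row r
def colRest (board : List (List Int)) (j : Nat) (r : Nat) : List Int :=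
  ((colOf board j).drop r).filter (fun x => decide (x ≠ 0))

-- the normalised (wrapped) Python index
def nidx (w : Nat) (c : Int) : Nat := (if 0 ≤ c then c else c + w).toNat

-- A's cols value as determined by the board and B's pointer list
def mapState (board : List (List Int)) (w : Nat) (tops : List Nat) : List (List Int) :=
  (List.range w).map (fun j => (colRest board j (tops.getD j 0)).reverse)

theorem pyGetD_norm {α : Type} {xs : List α} {w : Nat} {c : Int} (d : α)
    (hl : xs.length = w) (h1 : -(w : Int) ≤ c) (h2 : c < w) :
    PySem.List.pyGetD xs c d = xs.getD (nidx w c) d := by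
  by_cases h : 0 ≤ c
  · rw [PySem.List.pyGetD_eq_getElem xs d h (by omega)]
    unfold nidx
    rw [if_pos h, List.getD_eq_getElem _ _ (by omega)]
  · have hn : nidx w c < w := by unfold nidx; split <;> omega
    have hk : c = -(((-c).toNat : Nat) : Int) := by omega
    conv_lhs => rw [hk]
    rw [PySem.List.pyGetD_neg_natCast xs _ d (by omega) (by omega),
      List.getD_eq_getElem _ _ (by omega)]
    congr 1
    unfold nidx
    rw [if_neg (by omega)]
    omega

theorem pyGet?_norm {α : Type} {xs : List α} {w : Nat} {c : Int} (d : α)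
    (hl : xs.length = w) (h1 : -(w : Int) ≤ c) (h2 : c < w) :
    PySem.List.pyGet? xs c = some (xs.getD (nidx w c) d) := by
  by_cases h : 0 ≤ c
  · rw [PySem.List.pyGet?_eq_some_getElem xs h (by omega)]
    unfold nidx
    rw [if_pos h, List.getD_eq_getElem _ _ (by omega)]
  · have hn : nidx w c < w := by unfold nidx; split <;> omega
    have hk : c = -(((-c).toNat : Nat) : Int) := by omega
    conv_lhs => rw [hk]
    rw [PySem.List.pyGet?_neg_natCast xs _ (by omega) (by omega),
      List.getElem?_eq_getElem (by omega), List.getD_eq_getElem _ _ (by omega)]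
    congr 2
    unfold nidx
    rw [if_neg (by omega)]
    omega

theorem pyIdx?_neg {w : Nat} {c : Int} (h1 : -(w : Int) ≤ c) (_h2 : c < 0) :
    PySem.List.pyIdx? w c = some (c + w).toNat := by
  simp only [PySem.List.pyIdx?]
  rw [if_neg (by omega), if_pos h1]
  congr 1
  omega

theorem pySetD_norm {α : Type} {xs : List α} {w : Nat} {c : Int} (v : α)
    (hl : xs.length = w) (h1 : -(w : Int) ≤ c) (_h2 : c < w) :
    PySem.List.pySetD xs c v = xs.set (nidx w c) v := by
  by_cases h : 0 ≤ c
  · rw [PySem.List.pySetD_of_nonneg xs v h]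
    unfold nidx; rw [if_pos h]
  · unfold nidx
    rw [if_neg h]
    simp [PySem.List.pySetD, PySem.List.pySet?, hl, pyIdx?_neg h1 (by omega)]

theorem pyZip_cols {board : List (List Int)} {w : Nat}
    (hrect : ∀ row ∈ board, row.length = w) (hnil : board = [] → w = 0) :
    pyZip board = (List.range w).map (fun j => colOf board j) := by
  induction w generalizing board with
  | zero =>
    rw [pyZip]
    rw [dif_neg]
    · simp
    · rintro ⟨hne, hall⟩
      cases board with
      | nil => exact hne rfl
      | cons r rest =>
        have := hrect r (by simp)
        simp only [List.all_cons, Bool.and_eq_true, Bool.not_eq_true'] at hall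
        simp [List.eq_nil_of_length_eq_zero this] at hall
  | succ n ih =>
    have hbne : board ≠ [] := by intro h; exact Nat.succ_ne_zero n (hnil h)
    rw [pyZip, dif_pos]
    · have hr : ∀ row ∈ board.map List.tail, row.length = n := by
        intro row hrow
        obtain ⟨r, hr, rfl⟩ := List.mem_map.mp hrow
        have := hrect r hr
        simp [List.length_tail, this]
      rw [ih hr (by intro h; simp at h; exact absurd h hbne)]
      rw [List.range_succ_eq_map]
      simp only [List.map_cons, List.map_map]
      congr 1
      · unfold colOf
        apply List.map_congr_left
        intro r hr
        have hlen := hrect r hr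
        cases r with
        | nil => simp at hlen
        | cons a t => simp
      · apply List.map_congr_left
        intro j hj
        unfold colOf
        rw [List.map_map]
        apply List.map_congr_left
        intro r hr
        have hlen := hrect r hr
        cases r with
        | nil => simp at hlen
        | cons a t => simp
    · constructor
      · exact hbne
      · rw [List.all_eq_true]
        intro r hr
        have := hrect r hr
        simp
        intro hh
        rw [hh] at this
        simp at this

theorem colRest_cons {board : List (List Int)} {r : Nat} (j : Nat) (h : r < board.length) :
    colRest board j r =
      if board[r].getD j 0 = 0 then colRest board j (r + 1)
      else board[r].getD j 0 :: colRest board j (r + 1) := by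
  unfold colRest
  rw [List.drop_eq_getElem_cons (by simpa [colOf] using h)]
  have : (colOf board j)[r]'(by simpa [colOf] using h) = board[r].getD j 0 := by
    simp [colOf]
  rw [List.filter_cons, this]
  split
  · next hz => rw [if_neg (by simpa using hz)]
  · next hz => rw [if_pos (by simpa using hz)]

theorem advB_spec {board : List (List Int)} {w : Nat} {c : Int}
    (hrect : ∀ row ∈ board, row.length = w) (h1 : -(w : Int) ≤ c) (h2 : c < w) (r : Nat) :
    (∀ h : advB board c r < board.length,
      colRest board (nidx w c) r =
        (board[advB board c r]'h).getD (nidx w c) 0 :: colRest board (nidx w c) (advB board c r + 1) ∧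
      (board[advB board c r]'h).getD (nidx w c) 0 ≠ 0) ∧
    (¬ advB board c r < board.length → colRest board (nidx w c) r = []) := by
  fun_induction advB board c r with
  | case1 r h hz ih =>
    have hn : nidx w c < w := by unfold nidx; split <;> omega
    have hrl : board[r].length = w := hrect board[r] (by simp)
    have hcell : board[r].getD (nidx w c) 0 = 0 := by
      rw [pyGetD_norm 1 hrl h1 h2] at hz
      rw [List.getD_eq_getElem _ _ (by omega)]
      rw [List.getD_eq_getElem _ _ (by omega)] at hz
      exact hz
    constructor
    · intro hlt
      have := ih.1 hlt
      rw [colRest_cons (nidx w c) h, if_pos hcell]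
      exact this
    · intro hge
      rw [colRest_cons (nidx w c) h, if_pos hcell]
      exact ih.2 hge
  | case2 r h hz =>
    have hn : nidx w c < w := by unfold nidx; split <;> omega
    have hrl : board[r].length = w := hrect board[r] (by simp)
    have hcell : board[r].getD (nidx w c) 0 ≠ 0 := by
      rw [pyGetD_norm 1 hrl h1 h2] at hz
      rw [List.getD_eq_getElem _ _ (by omega)]
      rw [List.getD_eq_getElem _ _ (by omega)] at hz
      exact hz
    constructor
    · intro hlt
      rw [colRest_cons (nidx w c) h, if_neg hcell]
      exact ⟨rfl, hcell⟩
    · intro hge; exact absurd h hge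
  | case3 r h =>
    constructor
    · intro hlt; exact absurd hlt h
    · intro _
      unfold colRest
      rw [List.drop_eq_nil_of_le (by simp [colOf]; omega)]
      simp

theorem length_mapState (board : List (List Int)) (w : Nat) (tops : List Nat) :
    (mapState board w tops).length = w := by simp [mapState]

theorem getD_mapState (board : List (List Int)) (w : Nat) (tops : List Nat) {j : Nat}
    (hj : j < w) (d : List Int) :
    (mapState board w tops).getD j d = (colRest board j (tops.getD j 0)).reverse := by
  rw [List.getD_eq_getElem _ _ (by simp [mapState]; omega)]
  simp [mapState]

theorem mapState_set (board : List (List Int)) (w : Nat) (tops : List Nat) {j : Nat}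
    (hj : j < w) (hl : tops.length = w) (v : Nat) :
    mapState board w (tops.set j v) = (mapState board w tops).set j ((colRest board j v).reverse) := by
  apply List.ext_getElem
  · simp [mapState]
  · intro i hi1 hi2
    have hiw : i < w := by simpa [mapState] using hi1
    simp only [mapState, List.getElem_map, List.getElem_range]
    rw [List.getElem_set]
    by_cases hij : i = j
    · subst hij
      rw [if_pos rfl]
      congr 2
      rw [List.getD_eq_getElem _ _ (by rw [List.length_set, hl]; omega),
          List.getElem_set_self (by rw [List.length_set, hl]; omega)]
    · rw [if_neg (fun hh => hij hh.symm)]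
      simp only [List.getElem_map, List.getElem_range]
      congr 2
      rw [List.getD_eq_getElem _ _ (by rw [List.length_set, hl]; omega),
          List.getD_eq_getElem _ _ (by rw [hl]; omega),
          List.getElem_set_ne (fun hh => hij hh.symm)]

theorem step_eq {board : List (List Int)} {w : Nat} {tops : List Nat} {stack : List Int}
    {res : Int} {m : Int}
    (hrect : ∀ row ∈ board, row.length = w) (htl : tops.length = w)
    (hm1 : 1 - (w : Int) ≤ m) (hm2 : m ≤ (w : Int)) :
    stepA (mapState board w tops, stack, res) m =
      (mapState board w (stepB board (tops, stack, res) m).1,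
       (stepB board (tops, stack, res) m).2.1,
       (stepB board (tops, stack, res) m).2.2) ∧
    (stepB board (tops, stack, res) m).1.length = w := by
  have h1 : -(w : Int) ≤ m - 1 := by omega
  have h2 : m - 1 < w := by omega
  set c := m - 1 with hc
  set j := nidx w c with hjdef
  have hj : j < w := by rw [hjdef]; unfold nidx; split <;> omega
  set rj := tops.getD j 0 with hrj
  have hr : PySem.List.pyGetD tops c 0 = rj := by
    rw [pyGetD_norm 0 htl h1 h2]
  set r' := advB board c rj with hr'
  have hadv := advB_spec hrect h1 h2 rj
  have hget : PySem.List.pyGet? (mapState board w tops) c = some ((colRest board j rj).reverse) := by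
    rw [pyGet?_norm [] (length_mapState board w tops) h1 h2, getD_mapState board w tops hj]
  by_cases hlt : r' < board.length
  · obtain ⟨hcons, hne0⟩ := hadv.1 hlt
    set doll := (board[r']'hlt).getD j 0 with hdoll
    have hdollB : PySem.List.pyGetD (board[r']'hlt) c 0 = doll := by
      rw [pyGetD_norm 0 (hrect _ (by simp)) h1 h2]
    have hlast : ((colRest board j rj).reverse).getLast? = some doll := by
      rw [hcons]; simp
    have hdrop : ((colRest board j rj).reverse).dropLast = (colRest board j (r' + 1)).reverse := by
      rw [hcons]; simp only [List.reverse_cons, List.dropLast_concat]; rfl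
    have hset : PySem.List.pySetD (mapState board w tops) c ((colRest board j (r' + 1)).reverse)
        = mapState board w (tops.set j (r' + 1)) := by
      rw [pySetD_norm _ (length_mapState board w tops) h1 h2, ← mapState_set board w tops hj htl]
    have hsetB : PySem.List.pySetD tops c (r' + 1) = tops.set j (r' + 1) := by
      rw [pySetD_norm _ htl h1 h2]
    constructor
    · show stepA _ m = _
      unfold stepA stepB
      simp only [← hc, hget, hr, ← hr', dif_pos hlt, hlast, hdrop, hset, hsetB, hdollB]
      cases hst : stack.getLast? with
      | none => simp
      | some t =>
        by_cases ht : t = doll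
        · simp [ht]
        · simp [ht]
    · show (stepB board (tops, stack, res) m).1.length = w
      unfold stepB
      simp only [← hc, hr, ← hr', dif_pos hlt]
      cases hst : stack.getLast? with
      | none => simp [PySem.List.length_pySetD, htl]
      | some t =>
        by_cases ht : t = doll
        · simp [ht, hdollB, PySem.List.length_pySetD, htl]
        · simp [ht, hdollB, PySem.List.length_pySetD, htl]
  · have hnil : colRest board j rj = [] := hadv.2 hlt
    have hnil' : colRest board j r' = [] := by
      unfold colRest
      rw [List.drop_eq_nil_of_le (by simp [colOf]; omega)]
      simp
    have hms : mapState board w (tops.set j r') = mapState board w tops := by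
      rw [mapState_set board w tops hj htl, hnil']
      apply List.ext_getElem
      · simp
      · intro i hi1 hi2
        rw [List.getElem_set]
        by_cases hij : j = i
        · subst hij
          rw [if_pos rfl]
          rw [length_mapState] at hi2
          simp only [mapState, List.getElem_map, List.getElem_range]
          rw [← hrj, hnil]
        · rw [if_neg hij]
    constructor
    · unfold stepA stepB
      simp only [← hc, hget, hr, ← hr', dif_neg hlt, hnil]
      simp only [List.reverse_nil, List.getLast?_nil]
      rw [pySetD_norm _ htl h1 h2, hms]
    · unfold stepB
      simp only [← hc, hr, ← hr', dif_neg hlt]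
      simp [PySem.List.length_pySetD, htl]

theorem fold_eq {board : List (List Int)} {w : Nat}
    (hrect : ∀ row ∈ board, row.length = w) :
    ∀ (moves : List Int) (tops : List Nat) (stack : List Int) (res : Int),
      tops.length = w →
      (∀ m ∈ moves, 1 - (w : Int) ≤ m ∧ m ≤ (w : Int)) →
      (moves.foldl stepA (mapState board w tops, stack, res)).2.2 =
        (moves.foldl (stepB board) (tops, stack, res)).2.2 := by
  intro moves
  induction moves with
  | nil => intro tops stack res _ _; rfl
  | cons m ms ih =>
    intro tops stack res htl hb
    have hm := hb m (by simp)
    obtain ⟨hs, hl⟩ := step_eq (stack := stack) (res := res) hrect htl hm.1 hm.2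
    simp only [List.foldl_cons, hs]
    exact ih _ _ _ hl (fun x hx => hb x (by simp [hx]))

theorem init_cols (board : List (List Int)) :
    (∀ row ∈ board, row.length = board.headI.length) →
    (pyZip board).map (fun col => (col.filter (fun x => decide (x ≠ 0))).reverse) =
      mapState board board.headI.length (List.replicate board.headI.length 0) := by
  intro hrect
  have hnil : board = [] → board.headI.length = 0 := by intro h; subst h; rfl
  rw [pyZip_cols hrect hnil, List.map_map]
  unfold mapState
  apply List.map_congr_left
  intro j hj
  simp only [Function.comp_apply]
  congr 1
  unfold colRest
  have : (List.replicate board.headI.length (0:Nat)).getD j 0 = 0 := by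
    rw [List.getD_eq_getElem _ _ (by simpa using hj), List.getElem_replicate]
  rw [this, List.drop_zero]

-- ===== VERDICT (by name: the statement is the Claim_ definition above) =====
theorem solution_spec : Claim_equal_solution := by
  intro board moves _ hpre
  obtain ⟨hrect, hmv⟩ := hpre
  unfold Spec_solution solution solution_alt
  rw [init_cols board hrect]
  exact fold_eq hrect moves _ [] 0 (List.length_replicate)
    (fun m hm => ⟨(hmv m hm).1, (hmv m hm).2.1⟩)
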